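-- pv_equiv track=rewrite | github.com/boriskashentsev/AdventOfCode | 2015/2015.11.py | preparePassword
-- ===== SOURCE A (Python) =====
-- alphabet = "abcdefghijklmnopqrstuvwxyz"
--
-- def preparePassword(password):
--     '''Prepare password at the start to exclude letters O, I and L'''
--     numbers = [alphabet.index(char) for char in password]
--     exclude = 'oil'
--     excludeNumbers = [alphabet.index(char) for char in exclude]
--     index =0
--     while index < len(numbers):
--         if numbers[index] in excludeNumbers:
--             numbers[index] += 1
--             index += 1
--             while index < len(numbers):
--                 numbers[index] = 0
--                 index += 1
--         else:
--             index += 1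
--     return ''.join([alphabet[number] for number in numbers])
-- ===== SOURCE B (Python) =====
-- alphabet = "abcdefghijklmnopqrstuvwxyz"
--
-- def preparePassword(password):
--     '''Prepare password at the start to exclude letters O, I and L'''
--     i = min((j for j in (password.find(c) for c in 'oil') if j != -1), default=-1)
--     if i == -1:
--         return password
--     return password[:i] + chr(ord(password[i]) + 1) + 'a' * (len(password) - i - 1)
-- ===== Notes on version B (the rewrite author's own statement) =====
-- stated objective: simpler
-- what changed: Instead of mapping every character to an alphabet index and running A's stateful nested while-loops (bump in place, then zero the suffix cell by cell), B asks the string library where each forbidden letter first occurs (three str.find calls), takes the minimum position, and splices the answer directly: unchanged prefix, bumped letter, suffix filled with the alphabet's first letter.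
import Mathlib
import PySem

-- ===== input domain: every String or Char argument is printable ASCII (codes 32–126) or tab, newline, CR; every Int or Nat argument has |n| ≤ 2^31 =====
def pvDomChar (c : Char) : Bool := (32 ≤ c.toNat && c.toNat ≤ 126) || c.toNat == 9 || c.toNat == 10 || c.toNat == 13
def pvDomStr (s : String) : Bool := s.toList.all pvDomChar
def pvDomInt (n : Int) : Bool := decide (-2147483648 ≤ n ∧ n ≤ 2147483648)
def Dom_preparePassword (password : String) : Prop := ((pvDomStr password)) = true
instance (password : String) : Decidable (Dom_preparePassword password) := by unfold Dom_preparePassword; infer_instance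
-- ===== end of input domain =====

-- B drops A's index-list encoding and stateful nested while-loops entirely: it asks the
-- string library for the position of each forbidden letter (three str.find calls), takes
-- the minimum, and splices prefix, bumped letter and first-letter fill (objective: simpler).

-- ===== PORT A =====
def pvAlphabet : String := "abcdefghijklmnopqrstuvwxyz"

-- alphabet.index(char): Python raises ValueError when char is absent; Pre_ excludes
-- those inputs, and on present chars str.index = str.find (exact here).
def pvIdx (c : Char) : Int := PySem.Str.find pvAlphabet (String.ofList [c])

-- inner `while index < len(numbers): numbers[index] = 0; index += 1`
def pvZeroA : List Int → List Int
  | [] => []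
  | _ :: r => 0 :: pvZeroA r

-- outer while-loop over `numbers`
def pvLoopA (excl : List Int) : List Int → List Int
  | [] => []
  | n :: r => if n ∈ excl then (n + 1) :: pvZeroA r else n :: pvLoopA excl r

def preparePassword (password : String) : String :=
  let numbers := password.toList.map pvIdx
  let excludeNumbers := ("oil".toList).map pvIdx
  let numbers' := pvLoopA excludeNumbers numbers
  -- ''.join([alphabet[number] for number in numbers]): the .getD default is
  -- unreachable under Pre_ (every number stays in 0..25)
  String.ofList (numbers'.map (fun n => (PySem.List.pyGet? pvAlphabet.toList n).getD 'a'))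

-- ===== PORT B =====
-- `min((j for j in (password.find(c) for c in 'oil') if j != -1), default=-1)`
def pvCands (password : String) : List Int :=
  (("oil".toList).map (fun c => PySem.Str.find password (String.ofList [c]))).filter
    (fun j => decide (j ≠ -1))

def preparePassword_alt (password : String) : String :=
  let i := (PySem.List.min? (pvCands password) (fun x => x)).getD (-1)
  if i = -1 then password
  else
    -- password[:i] + chr(ord(password[i]) + 1) + 'a' * (len(password) - i - 1);
    -- the .getD default of password[i] is unreachable (i is a valid index here)
    String.ofList ((PySem.Str.slice password none (some i)).toList
      ++ [Char.ofNat (((PySem.Str.pyGet? password i).getD 'a').toNat + 1)]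
      ++ List.replicate ((PySem.Str.len password) - i - 1).toNat 'a')

-- ===== PRECONDITION & SPEC =====
-- Pre_ excludes exactly the strings containing a non-lowercase-letter character,
-- on which A raises ValueError (alphabet.index fails); A returns on all others.
def Pre_preparePassword (password : String) : Prop :=
  (password.toList.all (fun c => 97 ≤ c.toNat && c.toNat ≤ 122)) = true
instance (password : String) : Decidable (Pre_preparePassword password) := by
  unfold Pre_preparePassword; infer_instance
def pvWitness_preparePassword : String := "abcoxyz"

def Spec_preparePassword (password : String) (out : String) : Prop := out = preparePassword_alt password
instance (password : String) (out : String) : Decidable (Spec_preparePassword password out) := by unfold Spec_preparePassword; infer_instance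

-- ===== CLAIM (what is proved, stated in full; the proofs are below) =====
def Claim_equal_preparePassword : Prop := ∀ (password : String), Dom_preparePassword password → Pre_preparePassword password → Spec_preparePassword password (preparePassword password)

-- ===== LEMMAS AND PROOFS =====

-- decode for the A side
def pvDec (n : Int) : Char := (PySem.List.pyGet? pvAlphabet.toList n).getD 'a'

-- common specification of the result as a list of chars
def pvScanSpec : List Char → List Char
  | [] => []
  | c :: r => if c ∈ "oil".toList then Char.ofNat (c.toNat + 1) :: List.replicate r.length 'a'
              else c :: pvScanSpec r

-- ----- A side = pvScanSpec -----

theorem pvIdx_eq : ∀ k : Nat, k < 123 → 97 ≤ k → pvIdx (Char.ofNat k) = (k : Int) - 97 := by decide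

theorem pvDec_idx : ∀ k : Nat, k < 123 → 97 ≤ k → pvDec ((k : Int) - 97) = Char.ofNat k := by decide

theorem pvDec_idx_succ : ∀ k : Nat, k < 123 → 97 ≤ k → ((k : Int) - 97) ∈ ([14, 8, 11] : List Int) →
    pvDec ((k : Int) - 97 + 1) = Char.ofNat (k + 1) := by decide

theorem pvMem_excl : ∀ k : Nat, k < 123 → 97 ≤ k →
    ((((k : Int) - 97) ∈ ([14, 8, 11] : List Int)) ↔ Char.ofNat k ∈ "oil".toList) := by decide

theorem pvExcl_eval : ("oil".toList).map pvIdx = [14, 8, 11] := by decide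

theorem pvZeroA_dec (l : List Int) : (pvZeroA l).map pvDec = List.replicate l.length 'a' := by
  induction l with
  | nil => rfl
  | cons n r ih => simp [pvZeroA, List.replicate_succ, ih]; rfl

theorem pvLoopA_dec (cs : List Char) (h : ∀ c ∈ cs, 97 ≤ c.toNat ∧ c.toNat ≤ 122) :
    (pvLoopA [14, 8, 11] (cs.map pvIdx)).map pvDec = pvScanSpec cs := by
  induction cs with
  | nil => rfl
  | cons c r ih =>
    obtain ⟨h1, h2⟩ := h c (by simp)
    have hc : Char.ofNat c.toNat = c := Char.ofNat_toNat c
    have hidx : pvIdx c = (c.toNat : Int) - 97 := by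
      conv_lhs => rw [← hc]
      exact pvIdx_eq c.toNat (by omega) h1
    have hmem := pvMem_excl c.toNat (by omega) h1
    rw [hc] at hmem
    simp only [List.map_cons, pvLoopA, pvScanSpec, hidx]
    by_cases hm : c ∈ "oil".toList
    · rw [if_pos (hmem.mpr hm), if_pos hm]
      simp only [List.map_cons, pvZeroA_dec, List.length_map]
      rw [pvDec_idx_succ c.toNat (by omega) h1 (hmem.mpr hm)]
    · rw [if_neg (fun hx => hm (hmem.mp hx)), if_neg hm]
      simp only [List.map_cons]
      rw [pvDec_idx c.toNat (by omega) h1, hc,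
        ih (fun x hx => h x (List.mem_cons_of_mem _ hx))]

-- ----- B side = pvScanSpec -----

-- a one-char pattern is a prefix of `l.drop k` exactly when `l` has char `c` at `k`
theorem pvSingle_prefix_drop (c : Char) (l : List Char) (k : Nat) :
    [c] <+: l.drop k ↔ ∃ h : k < l.length, l[k] = c := by
  by_cases hk : k < l.length
  · rw [List.drop_eq_getElem_cons hk]
    constructor
    · intro h
      have := (List.cons_prefix_cons.mp h).1
      exact ⟨hk, this.symm⟩
    · rintro ⟨h1, h2⟩
      exact List.cons_prefix_cons.mpr ⟨h2.symm, by simp⟩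
  · rw [List.drop_eq_nil_of_le (by omega)]
    constructor
    · intro h
      have := h.length_le
      simp at this
    · rintro ⟨h, -⟩
      omega

-- a one-char pattern is an infix exactly when the char occurs
theorem pvSingle_infix (c : Char) (l : List Char) : [c] <:+: l ↔ c ∈ l := by
  constructor
  · intro h
    exact h.subset (by simp)
  · intro h
    obtain ⟨s, t, rfl⟩ := List.append_of_mem h
    exact ⟨s, t, by simp⟩

-- single-char find characterization: -1 when absent; otherwise the least index holding c
theorem pvFind_single (s : String) (c : Char) (hc : c ∉ s.toList) :
    PySem.Str.find s (String.ofList [c]) = -1 := by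
  rw [PySem.Str.find_eq]
  simp only [String.toList_ofList]
  exact (PySem.Chars.find_eq_neg_one_iff _ _).mpr (fun h => hc ((pvSingle_infix c s.toList).mp h))

theorem pvFind_single_mem (s : String) (c : Char) (hc : c ∈ s.toList) :
    ∃ k : Nat, PySem.Str.find s (String.ofList [c]) = (k : Int) ∧
      ∃ h : k < s.toList.length, s.toList[k] = c ∧ ∀ i, (h2 : i < k) → s.toList[i]'(by omega) ≠ c := by
  rw [PySem.Str.find_eq]
  simp only [String.toList_ofList]
  have hnn : 0 ≤ PySem.Chars.find s.toList [c] :=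
    (PySem.Chars.find_nonneg_iff _ _).mpr ((pvSingle_infix c s.toList).mpr hc)
  obtain ⟨hpre, hmin⟩ := PySem.Chars.find_spec (s := s.toList) (sub := [c]) hnn
  obtain ⟨hk, hget⟩ := (pvSingle_prefix_drop c s.toList _).mp hpre
  refine ⟨(PySem.Chars.find s.toList [c]).toNat, by omega, hk, hget, ?_⟩
  intro i hi hci
  exact hmin i hi ((pvSingle_prefix_drop c s.toList i).mpr ⟨by omega, hci⟩)

-- no forbidden letter: pvScanSpec is the identity
theorem pvScanSpec_id (cs : List Char) (h : ∀ c ∈ cs, c ∉ "oil".toList) :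
    pvScanSpec cs = cs := by
  induction cs with
  | nil => rfl
  | cons c r ih =>
    rw [pvScanSpec, if_neg (h c (by simp)), ih (fun x hx => h x (List.mem_cons_of_mem _ hx))]

-- first forbidden letter at j: pvScanSpec = take j ++ bump ++ fill
theorem pvScanSpec_splice (cs : List Char) (j : Nat) (hlt : j < cs.length)
    (hfirst : ∀ i, (h : i < j) → cs[i]'(by omega) ∉ "oil".toList) (hj : cs[j] ∈ "oil".toList) :
    pvScanSpec cs = cs.take j ++ Char.ofNat (cs[j].toNat + 1) :: List.replicate (cs.length - j - 1) 'a' := by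
  induction cs generalizing j with
  | nil => simp at hlt
  | cons c r ih =>
    cases j with
    | zero =>
      simp only [List.getElem_cons_zero] at hj
      rw [pvScanSpec, if_pos hj]
      simp [List.length_cons]
    | succ j' =>
      have hc : c ∉ "oil".toList := by
        have := hfirst 0 (by omega); simpa using this
      simp only [List.getElem_cons_succ] at hj
      rw [pvScanSpec, if_neg hc,
        ih j' (by simpa using hlt) (fun i hi => by simpa using hfirst (i+1) (by omega)) hj]
      simp only [List.length_cons, List.take_succ_cons, List.cons_append]
      rw [show r.length + 1 - (j' + 1) - 1 = r.length - j' - 1 from by omega]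
      simp [List.getElem_cons_succ]

-- j ≤ any index holding a character of 'oil'
theorem pvFindIdx_le (cs : List Char) (k : Nat) (hk : k < cs.length)
    (h : cs[k] ∈ "oil".toList) :
    cs.findIdx (fun c => decide (c ∈ "oil".toList)) ≤ k := by
  by_contra hlt
  have hfalse : decide (cs[k] ∈ "oil".toList) = false :=
    List.not_of_lt_findIdx (p := fun c => decide (c ∈ "oil".toList)) (xs := cs) (i := k) (by omega)
  have htrue : decide (cs[k] ∈ "oil".toList) = true := decide_eq_true h
  rw [htrue] at hfalse
  exact Bool.noConfusion hfalse

-- every candidate value is ≥ the first forbidden position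
theorem pvCands_ge (password : String) (x : Int) (hx : x ∈ pvCands password) :
    (password.toList.findIdx (fun c => decide (c ∈ "oil".toList)) : Int) ≤ x := by
  obtain ⟨hx1, hx2⟩ := List.mem_filter.mp hx
  obtain ⟨c, hc, rfl⟩ := List.mem_map.mp hx1
  by_cases hmem : c ∈ password.toList
  · obtain ⟨k, hfk, hklt, hget, -⟩ := pvFind_single_mem password c hmem
    rw [hfk]
    have hj := pvFindIdx_le password.toList k hklt (hget ▸ hc)
    exact_mod_cast hj
  · rw [pvFind_single password c hmem] at hx2
    simp at hx2

-- the find of the first forbidden character is exactly its position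
theorem pvFind_first (password : String)
    (hj : password.toList.findIdx (fun c => decide (c ∈ "oil".toList)) < password.toList.length) :
    PySem.Str.find password
        (String.ofList [password.toList[password.toList.findIdx (fun c => decide (c ∈ "oil".toList))]]) =
      (password.toList.findIdx (fun c => decide (c ∈ "oil".toList)) : Int) := by
  set cs := password.toList with hcs
  set j := cs.findIdx (fun c => decide (c ∈ "oil".toList)) with hjdef
  have hmem : cs[j] ∈ cs := List.getElem_mem hj
  obtain ⟨k, hfk, hklt, hget, hmin⟩ := pvFind_single_mem password cs[j] hmem
  have hpj : cs[j] ∈ "oil".toList :=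
    of_decide_eq_true (List.findIdx_getElem (p := fun c => decide (c ∈ "oil".toList)) (xs := cs) (w := hj))
  have h1 : j ≤ k := pvFindIdx_le cs k hklt (hget ▸ hpj)
  have h2 : ¬ j < k := fun hlt => hmin j hlt rfl
  have : k = j := by omega
  rw [hfk, this]

-- B computes the common specification on every input
theorem pvAlt_eq (password : String) :
    preparePassword_alt password = String.ofList (pvScanSpec password.toList) := by
  by_cases hex : ∃ c ∈ password.toList, c ∈ "oil".toList
  · -- some forbidden letter exists
    set cs := password.toList with hcs
    set j := cs.findIdx (fun c => decide (c ∈ "oil".toList)) with hjdef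
    have hj : j < cs.length := by
      rw [hjdef]
      exact List.findIdx_lt_length.mpr (by
        obtain ⟨c, hc1, hc2⟩ := hex
        exact ⟨c, hc1, by simpa using hc2⟩)
    have hpj : cs[j] ∈ "oil".toList :=
      of_decide_eq_true (List.findIdx_getElem (p := fun c => decide (c ∈ "oil".toList)) (xs := cs) (w := hj))
    have hfirst : ∀ i, (h : i < j) → cs[i]'(by omega) ∉ "oil".toList := by
      intro i hi hmem
      have hfalse : decide (cs[i]'(by omega) ∈ "oil".toList) = false :=
        List.not_of_lt_findIdx (p := fun c => decide (c ∈ "oil".toList)) (xs := cs) (i := i) hi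
      have htrue : decide (cs[i]'(by omega) ∈ "oil".toList) = true := decide_eq_true hmem
      rw [htrue] at hfalse
      exact Bool.noConfusion hfalse
    have hfind := pvFind_first password hj
    have hjmem : (j : Int) ∈ pvCands password := by
      apply List.mem_filter.mpr
      refine ⟨List.mem_map.mpr ⟨cs[j], hpj, hfind⟩, by simp⟩
    have hne : pvCands password ≠ [] := fun h => by simp [h] at hjmem
    obtain ⟨m, hm⟩ : ∃ m, PySem.List.min? (pvCands password) (fun x => x) = some m := by
      cases hmo : PySem.List.min? (pvCands password) (fun x => x) with
      | none => exact absurd ((PySem.List.min?_eq_none_iff _ _).mp hmo) hne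
      | some m => exact ⟨m, rfl⟩
    have hmle : m ≤ (j : Int) := PySem.List.min?_isMin hm _ hjmem
    have hmge : (j : Int) ≤ m := pvCands_ge password m (PySem.List.min?_mem hm)
    have hmj : m = (j : Int) := le_antisymm hmle hmge
    unfold preparePassword_alt
    rw [hm]
    simp only [Option.getD_some, hmj]
    rw [if_neg (by omega)]
    have hslice : (PySem.Str.slice password none (some (j : Int))).toList = cs.take j := by
      rw [hcs]
      simp [PySem.List.slice_to_natCast]
    have hget : (PySem.Str.pyGet? password (j : Int)).getD 'a' = cs[j] := by
      rw [PySem.Str.pyGet?_eq]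
      have : PySem.Chars.pyGet? cs (j : Int) = cs[j]? := PySem.List.pyGet?_natCast cs j
      rw [← hcs, this, List.getElem?_eq_getElem hj]
      rfl
    have hlen : ((PySem.Str.len password) - (j : Int) - 1).toNat = cs.length - j - 1 := by
      rw [PySem.Str.len_eq, ← hcs]
      omega
    rw [hslice, hget, hlen, pvScanSpec_splice cs j hj hfirst hpj]
    simp
  · -- no forbidden letter: all three finds are -1
    push Not at hex
    have h3 : ∀ c ∈ ("oil".toList), c ∉ password.toList := by
      intro c hc hmem
      exact hex c hmem hc
    have hcands : pvCands password = [] := by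
      unfold pvCands
      rw [show "oil".toList = ['o', 'i', 'l'] from by decide]
      simp only [List.map_cons, List.map_nil,
        pvFind_single password 'o' (h3 'o' (by decide)),
        pvFind_single password 'i' (h3 'i' (by decide)),
        pvFind_single password 'l' (h3 'l' (by decide))]
      decide
    unfold preparePassword_alt
    rw [hcands]
    simp only [PySem.List.min?]
    rw [pvScanSpec_id password.toList (fun c hc hm => hex c hc hm)]
    exact (String.ofList_toList (s := password)).symm

-- ===== VERDICT (by name: the statement is the Claim_ definition above) =====
theorem preparePassword_spec : Claim_equal_preparePassword := by
  intro password _ hpre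
  have hpre' : ∀ c ∈ password.toList, 97 ≤ c.toNat ∧ c.toNat ≤ 122 := by
    intro c hc
    simpa using List.all_eq_true.mp hpre c hc
  unfold Spec_preparePassword preparePassword
  rw [pvAlt_eq, pvExcl_eval]
  exact congrArg String.ofList (pvLoopA_dec password.toList hpre')
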